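-- pv_equiv track=rewrite | github.com/Nogal2222/CoTe | 프로그래머스/lever 3/풍선 터트리기.py | solution
-- ===== SOURCE A (Python) =====
-- def solution(a):
--     result = [False for _ in range(len(a))]
--     min_front, min_rear = float('inf'), float('inf')
--
--     for i in range(len(a)):
--         if a[i] < min_front:
--             min_front = a[i]
--             result[i] = True
--
--         if a[-1-i] < min_rear:
--             min_rear = a[-1-i]
--             result[-1-i] = True
--
--     answer = sum(result)
--
--     return answer
-- ===== SOURCE B (Python) =====
-- def solution(a):
--     # Build prefix-min and suffix-min tables, then count indices that start a
--     # strictly new prefix minimum or a strictly new suffix minimum.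
--     n = len(a)
--     pre = []
--     m = None
--     for x in a:
--         m = x if m is None or x < m else m
--         pre.append(m)
--     suf = []
--     m = None
--     for x in reversed(a):
--         m = x if m is None or x < m else m
--         suf.append(m)
--     suf.reverse()
--     count = 0
--     for i in range(n):
--         if i == 0 or pre[i] < pre[i - 1] or i == n - 1 or suf[i] < suf[i + 1]:
--             count += 1
--     return count
-- ===== Notes on version B (the rewrite author's own statement) =====
-- stated objective: alternative
-- what changed: A marks survivors in a boolean array during one interleaved front/back running-minimum scan and sums it; B first builds explicit prefix-min and suffix-min tables and then runs a separate counting pass that counts an index when it starts a strictly new prefix or suffix minimum.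
import Mathlib
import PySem

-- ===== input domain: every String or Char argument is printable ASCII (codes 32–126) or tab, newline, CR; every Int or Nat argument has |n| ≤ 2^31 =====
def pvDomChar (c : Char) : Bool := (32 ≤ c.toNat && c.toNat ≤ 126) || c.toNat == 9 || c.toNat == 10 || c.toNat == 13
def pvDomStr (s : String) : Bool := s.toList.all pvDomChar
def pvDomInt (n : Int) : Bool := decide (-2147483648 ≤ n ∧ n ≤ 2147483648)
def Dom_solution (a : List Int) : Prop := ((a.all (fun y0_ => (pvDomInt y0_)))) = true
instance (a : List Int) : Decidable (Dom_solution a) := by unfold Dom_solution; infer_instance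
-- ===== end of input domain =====

-- B replaces A's interleaved front/back marking scan by prefix-min / suffix-min tables
-- followed by a separate counting pass (alternative decomposition, same O(n) cost).

-- ===== PORT A =====
-- 'None' plays the role of Python's float('inf') seed: oltB none x = true ↔ x < inf.
def oltB (o : Option Int) (x : Int) : Bool :=
  match o with
  | none => true
  | some m => decide (x < m)

-- one iteration of A's loop; a[i] and a[-1-i] are always in range for i ∈ range(len(a))
-- (the negative index -1-i wraps to n-1-i), so getD is exact here.
def stepA (a : List Int) (n : Nat) (st : List Bool × Option Int × Option Int) (i : Nat) :
    List Bool × Option Int × Option Int :=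
  let s1 := if oltB st.2.1 (a.getD i 0) then (st.1.set i true, some (a.getD i 0)) else (st.1, st.2.1)
  let s2 := if oltB st.2.2 (a.getD (n - 1 - i) 0) then (s1.1.set (n - 1 - i) true, some (a.getD (n - 1 - i) 0))
            else (s1.1, st.2.2)
  (s2.1, s1.2, s2.2)

def solution (a : List Int) : Int :=
  let n := a.length
  let st := (List.range n).foldl (stepA a n) (List.replicate n false, none, none)
  -- sum(result): Python's sum of a bool list counts the Trues
  st.1.foldl (fun s b => s + (if b then (1 : Int) else 0)) 0

-- ===== PORT B =====
-- 'm = x if m is None or x < m else m' with m : Option Int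
def ominv (m : Option Int) (x : Int) : Int :=
  match m with
  | none => x
  | some mm => if x < mm then x else mm

-- one iteration of B's table-building loops ('m = …; lst.append(m)')
def stepPre (st : List Int × Option Int) (x : Int) : List Int × Option Int :=
  let m' := ominv st.2 x
  (st.1 ++ [m'], some m')

def solution_alt (a : List Int) : Int :=
  let n := a.length
  let pre := (a.foldl stepPre ([], none)).1
  let suf := ((a.reverse.foldl stepPre ([], none)).1).reverse
  -- counting pass; all getD indices are guarded in range by the short-circuit disjuncts
  (List.range n).foldl (fun c i =>
    if (i == 0) || decide (pre.getD i 0 < pre.getD (i - 1) 0) || (i == n - 1)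
        || decide (suf.getD i 0 < suf.getD (i + 1) 0)
    then c + 1 else c) 0

-- ===== PRECONDITION & SPEC =====
def Spec_solution (a : List Int) (out : Int) : Prop := out = solution_alt a
instance (a : List Int) (out : Int) : Decidable (Spec_solution a out) := by unfold Spec_solution; infer_instance

-- ===== CLAIM (what is proved, stated in full; the proofs are below) =====
def Claim_equal_solution : Prop := ∀ (a : List Int), Dom_solution a → Spec_solution a (solution a)

-- ===== LEMMAS AND PROOFS =====

-- min with an Option accumulator (none = +inf)
def omin (o : Option Int) (x : Int) : Option Int := some (ominv o x)

-- min of the first t elements of a (none when t = 0)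
def pmin (a : List Int) : Nat → Option Int
  | 0 => none
  | t + 1 => omin (pmin a t) (a.getD t 0)

-- min of the last t elements of a (none when t = 0)
def smin (a : List Int) : Nat → Option Int
  | 0 => none
  | t + 1 => omin (smin a t) (a.getD (a.length - 1 - t) 0)

-- i starts a strictly new prefix minimum / suffix minimum
def Fb (a : List Int) (k : Nat) : Bool := oltB (pmin a k) (a.getD k 0)
def Rb (a : List Int) (k : Nat) : Bool := oltB (smin a (a.length - 1 - k)) (a.getD k 0)

-- contents of A's result array after t loop iterations
def G (a : List Int) (t k : Nat) : Bool :=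
  decide ((k < t ∧ Fb a k = true) ∨ (a.length - t ≤ k ∧ Rb a k = true))

def ofold (m : Option Int) (l : List Int) : Option Int := l.foldl omin m

-- the list of running minima that B's append loop produces
def preScan (m : Option Int) : List Int → List Int
  | [] => []
  | x :: t => ominv m x :: preScan (some (ominv m x)) t

theorem omin_of_oltB_true {o : Option Int} {x : Int} (h : oltB o x = true) : omin o x = some x := by
  cases o <;> simp_all [omin, ominv, oltB]

theorem omin_of_oltB_false {o : Option Int} {x : Int} (h : oltB o x = false) : omin o x = o := by
  cases o <;> simp_all [omin, ominv, oltB]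

theorem omin_comm2 (m : Option Int) (x y : Int) : omin (omin m x) y = omin (omin m y) x := by
  cases m <;> simp only [omin, ominv, Option.some.injEq] <;> split_ifs <;> omega

theorem omin_fold_comm (l : List Int) (m : Option Int) (x : Int) :
    l.foldl omin (omin m x) = omin (l.foldl omin m) x := by
  induction l generalizing m x with
  | nil => rfl
  | cons y t ih =>
    simp only [List.foldl_cons]
    rw [omin_comm2, ih]

theorem ofold_reverse (l : List Int) (m : Option Int) : ofold m l.reverse = ofold m l := by
  induction l generalizing m with
  | nil => rfl
  | cons x t ih =>
    simp only [ofold, List.reverse_cons, List.foldl_append, List.foldl_cons, List.foldl_nil]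
    rw [omin_fold_comm]
    have h := ih m
    simp only [ofold] at h
    rw [h]

theorem pmin_eq (a : List Int) (t : Nat) (h : t ≤ a.length) : pmin a t = ofold none (a.take t) := by
  induction t with
  | zero => rfl
  | succ t ih =>
    have ht : t < a.length := by omega
    rw [pmin, ih (by omega), List.take_add_one, List.getElem?_eq_getElem ht]
    simp only [Option.toList_some, ofold, List.foldl_append, List.foldl_cons, List.foldl_nil]
    rw [List.getD_eq_getElem _ _ ht]

theorem smin_eq (a : List Int) (t : Nat) (h : t ≤ a.length) :
    smin a t = ofold none (a.drop (a.length - t)) := by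
  induction t with
  | zero => simp [smin, ofold, List.drop_length]
  | succ t ih =>
    have h1 : a.length - (t + 1) < a.length := by omega
    have h2 : a.length - (t + 1) + 1 = a.length - t := by omega
    have h3 : a.length - 1 - t = a.length - (t + 1) := by omega
    rw [smin, ih (by omega), List.drop_eq_getElem_cons h1]
    simp only [ofold, List.foldl_cons]
    rw [omin_fold_comm, h2]
    rw [List.getD_eq_getElem _ _ (by omega : a.length - 1 - t < a.length)]
    congr 2

theorem scan_fold (xs : List Int) (p : List Int) (m : Option Int) :
    xs.foldl stepPre (p, m) = (p ++ preScan m xs, ofold m xs) := by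
  induction xs generalizing p m with
  | nil => simp [preScan, ofold]
  | cons x t ih =>
    simp only [List.foldl_cons, stepPre, preScan, ofold]
    rw [ih]
    simp [omin, ofold]

theorem preScan_length (m : Option Int) (xs : List Int) : (preScan m xs).length = xs.length := by
  induction xs generalizing m with
  | nil => rfl
  | cons x t ih => simp [preScan, ih]

theorem preScan_get (xs : List Int) (m : Option Int) (k : Nat) (h : k < xs.length) :
    (preScan m xs)[k]? = ofold m (xs.take (k + 1)) := by
  induction xs generalizing m k with
  | nil => simp at h
  | cons x t ih =>
    cases k with
    | zero => simp [preScan, ofold, omin]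
    | succ k =>
      simp only [preScan, List.getElem?_cons_succ, List.take_succ_cons]
      rw [ih _ _ (by simpa using h)]
      simp [ofold, omin]

-- ===== A-side: loop invariant =====
theorem G_succ (a : List Int) (t k : Nat) (ht : t < a.length) (_hk : k < a.length) :
    G a (t + 1) k
      = if k = a.length - 1 - t ∧ Rb a (a.length - 1 - t) = true then true
        else if k = t ∧ Fb a t = true then true
        else G a t k := by
  unfold G
  split_ifs with h1 h2
  · simp only [decide_eq_true_eq]
    right
    exact ⟨by omega, h1.1 ▸ h1.2⟩
  · simp only [decide_eq_true_eq]
    left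
    exact ⟨by omega, h2.1 ▸ h2.2⟩
  · rw [decide_eq_decide]
    constructor
    · rintro (⟨hlt, hf⟩ | ⟨hge, hr⟩)
      · rcases Nat.lt_or_ge k t with h | h
        · exact Or.inl ⟨h, hf⟩
        · exact absurd ⟨by omega, by rwa [show t = k by omega]⟩ h2
      · rcases Nat.lt_or_ge k (a.length - t) with h | h
        · exact absurd ⟨by omega, by rwa [show a.length - 1 - t = k by omega]⟩ h1
        · exact Or.inr ⟨h, hr⟩
    · rintro (⟨hlt, hf⟩ | ⟨hge, hr⟩)
      · exact Or.inl ⟨by omega, hf⟩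
      · exact Or.inr ⟨by omega, hr⟩

theorem Rb_idx (a : List Int) (t : Nat) (ht : t < a.length) :
    Rb a (a.length - 1 - t) = oltB (smin a t) (a.getD (a.length - 1 - t) 0) := by
  rw [Rb, show a.length - 1 - (a.length - 1 - t) = t by omega]

theorem A_inv (a : List Int) (t : Nat) (ht : t ≤ a.length) :
    (List.range t).foldl (stepA a a.length) (List.replicate a.length false, none, none)
      = ((List.range a.length).map (G a t), pmin a t, smin a t) := by
  induction t with
  | zero =>
    rw [List.range_zero, List.foldl_nil]
    refine congrArg (·, (none, none)) ?_
    apply List.ext_getElem (by simp)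
    intro k hk1 hk2
    simp only [List.getElem_replicate, List.getElem_map, List.getElem_range]
    have hk : k < a.length := by simpa using hk1
    symm
    simp only [G, Nat.sub_zero, decide_eq_false_iff_not]
    rintro (⟨h, _⟩ | ⟨h, _⟩) <;> omega
  | succ t ih =>
    have ht' : t < a.length := by omega
    rw [List.range_succ, List.foldl_append, ih (by omega), List.foldl_cons, List.foldl_nil]
    simp only [stepA]
    cases hF : oltB (pmin a t) (a.getD t 0) <;>
      cases hR : oltB (smin a t) (a.getD (a.length - 1 - t) 0) <;>
        simp only [if_true, if_false, Bool.false_eq_true, Prod.mk.injEq] <;>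
          refine ⟨?_, ?_, ?_⟩
    case false.false.refine_2 => rw [pmin]; exact (omin_of_oltB_false hF).symm
    case false.true.refine_2 => rw [pmin]; exact (omin_of_oltB_false hF).symm
    case true.false.refine_2 => rw [pmin]; exact (omin_of_oltB_true hF).symm
    case true.true.refine_2 => rw [pmin]; exact (omin_of_oltB_true hF).symm
    case false.false.refine_3 => rw [smin]; exact (omin_of_oltB_false hR).symm
    case true.false.refine_3 => rw [smin]; exact (omin_of_oltB_false hR).symm
    case false.true.refine_3 => rw [smin]; exact (omin_of_oltB_true hR).symm
    case true.true.refine_3 => rw [smin]; exact (omin_of_oltB_true hR).symm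
    all_goals {
      have hFb : Fb a t = oltB (pmin a t) (a.getD t 0) := rfl
      rw [hF] at hFb
      have hRb := (Rb_idx a t ht').trans hR
      apply List.ext_getElem (by simp)
      intro k hk1 hk2
      have hk : k < a.length := by simp at hk2; omega
      simp only [List.getElem_set, List.getElem_map, List.getElem_range,
        G_succ a t k ht' hk, hFb, hRb, Bool.false_eq_true, and_true, and_false,
        if_false] <;>
      split_ifs <;> first | rfl | omega
    }

-- ===== B-side: table characterisation =====
theorem pre_getD (a : List Int) (i : Nat) (hi : i < a.length) :
    ((a.foldl stepPre ([], none)).1).getD i 0 = ominv (pmin a i) (a.getD i 0) := by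
  rw [scan_fold, List.getD_eq_getElem?_getD]
  simp only [List.nil_append]
  rw [preScan_get a none i hi, ← pmin_eq a (i + 1) (by omega), pmin]
  rfl

theorem suf_getD (a : List Int) (k : Nat) (hk : k < a.length) :
    (((a.reverse.foldl stepPre ([], none)).1).reverse).getD k 0
      = ominv (smin a (a.length - 1 - k)) (a.getD k 0) := by
  rw [scan_fold, List.getD_eq_getElem?_getD]
  simp only [List.nil_append]
  have hlen : k < (preScan none a.reverse).length := by
    rw [preScan_length]; simpa using hk
  rw [List.getElem?_reverse hlen, preScan_length, List.length_reverse]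
  have h2 : a.length - 1 - k < a.reverse.length := by simp; omega
  rw [preScan_get a.reverse none _ h2]
  have h3 : a.length - 1 - k + 1 = a.length - k := by omega
  rw [h3, List.take_reverse]
  have h4 : a.length - (a.length - k) = k := by omega
  rw [h4, ofold_reverse]
  have hs9 := smin_eq a (a.length - k) (by omega)
  rw [h4] at hs9
  rw [← hs9]
  have h5 : a.length - k = (a.length - 1 - k) + 1 := by omega
  rw [h5, smin]
  have h6 : a.length - 1 - (a.length - 1 - k) = k := by omega
  rw [h6]
  rfl

theorem ominv_lt (m x : Int) : decide (ominv (some m) x < m) = decide (x < m) := by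
  by_cases h : x < m <;> simp [ominv, h]

theorem cond_eq (a : List Int) (i : Nat) (hi : i < a.length) :
    ((i == 0) || decide (((a.foldl stepPre ([], none)).1).getD i 0 < ((a.foldl stepPre ([], none)).1).getD (i - 1) 0)
      || (i == a.length - 1)
      || decide ((((a.reverse.foldl stepPre ([], none)).1).reverse).getD i 0
                  < (((a.reverse.foldl stepPre ([], none)).1).reverse).getD (i + 1) 0))
    = (Fb a i || Rb a i) := by
  by_cases h0 : i = 0
  · subst h0
    simp [Fb, pmin, oltB]
  -- front disjunct: pre[i] < pre[i-1] ↔ Fb a i   (for i > 0)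
  have hfront : decide (((a.foldl stepPre ([], none)).1).getD i 0 < ((a.foldl stepPre ([], none)).1).getD (i - 1) 0)
      = Fb a i := by
    rw [pre_getD a i hi, pre_getD a (i - 1) (by omega)]
    have hsplit : i = (i - 1) + 1 := by omega
    have hp : pmin a i = some (ominv (pmin a (i - 1)) (a.getD (i - 1) 0)) := by
      rw [hsplit, pmin]; rfl
    rw [Fb, hp, ominv_lt, oltB]
  by_cases hl : i = a.length - 1
  · have : Rb a i = true := by
      rw [Rb, hl]
      simp [smin, oltB]
    rw [hl] at this
    simp [this, hl]
  -- rear disjunct: suf[i] < suf[i+1] ↔ Rb a i   (for i < n-1)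
  have hrear : decide ((((a.reverse.foldl stepPre ([], none)).1).reverse).getD i 0
                  < (((a.reverse.foldl stepPre ([], none)).1).reverse).getD (i + 1) 0)
      = Rb a i := by
    rw [suf_getD a i hi, suf_getD a (i + 1) (by omega)]
    have hs : smin a (a.length - 1 - i)
        = some (ominv (smin a (a.length - 1 - (i + 1))) (a.getD (i + 1) 0)) := by
      have h7 : a.length - 1 - i = (a.length - 1 - (i + 1)) + 1 := by omega
      rw [h7, smin]
      have h8 : a.length - 1 - (a.length - 1 - (i + 1)) = i + 1 := by omega
      rw [h8]
      rfl
    rw [Rb, hs, ominv_lt, oltB]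
  rw [hfront, hrear]
  have hb0 : (i == 0) = false := by simp [h0]
  have hbl : (i == a.length - 1) = false := by simp [hl]
  rw [hb0, hbl]
  cases Fb a i <;> cases Rb a i <;> rfl

theorem G_top (a : List Int) (k : Nat) (hk : k < a.length) :
    G a a.length k = (Fb a k || Rb a k) := by
  unfold G
  cases hf : Fb a k <;> cases hr : Rb a k <;> simp [hk]

-- ===== VERDICT (by name: the statement is the Claim_ definition above) =====
theorem solution_spec : Claim_equal_solution := by
  intro a _
  show solution a = solution_alt a
  have hL : solution a = ((List.range a.length).countP (fun k => Fb a k || Rb a k) : Int) := by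
    simp only [solution]
    rw [A_inv a a.length le_rfl]
    rw [List.foldl_map]
    rw [PySem.List.foldl_congr_mem (List.range a.length)
      (fun (x : Int) (y : Nat) => x + if G a a.length y = true then 1 else 0)
      (fun (s : Int) (k : Nat) => if (Fb a k || Rb a k) then s + 1 else s) 0
      (fun acc x hx => by
        simp only [G_top a x (by simpa using hx)]
        cases (Fb a x || Rb a x) <;> simp)]
    rw [PySem.List.foldl_if_add_one]
    simp
  have hRt : solution_alt a = ((List.range a.length).countP (fun k => Fb a k || Rb a k) : Int) := by
    simp only [solution_alt]
    rw [PySem.List.foldl_if_add_one]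
    rw [List.countP_congr (fun x hx => by
      rw [cond_eq a x (by simpa using hx)])]
    simp
  rw [hL, hRt]
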